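-- pv_equiv track=rewrite | github.com/IVANMORAG/Python-Coding-Exercises | 05_Iteracion_y_Busqueda/5.3_Looping_and_Counting/134_Ejercicio.py | contar_par_rangos
-- ===== SOURCE A (Python) =====
-- def contar_par_rangos(lista_edades):
--
--     contador_menores = 0
--     contador_adultos = 0
--     contador_mayores = 0
--
--     for edad in lista_edades:
--
--         if edad > 0 and edad <= 17:
--             contador_menores =contador_menores + 1
--         elif edad >= 18 and edad <= 64:
--             contador_adultos = contador_adultos + 1
--         else:
--             contador_mayores = contador_mayores + 1
--
--     return f"Menores: {contador_menores}. \n Adultos: {contador_adultos}. \n Mayores: {contador_mayores}."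
-- ===== SOURCE B (Python) =====
-- def contar_par_rangos(lista_edades):
--     orden = sorted(lista_edades)
--     n = len(orden)
--
--     def cuantos_hasta(x):
--         # binary search: number of elements <= x in the sorted list
--         lo, hi = 0, n
--         while lo < hi:
--             mid = (lo + hi) // 2
--             if orden[mid] <= x:
--                 lo = mid + 1
--             else:
--                 hi = mid
--         return lo
--
--     c0 = cuantos_hasta(0)
--     c17 = cuantos_hasta(17)
--     c64 = cuantos_hasta(64)
--     menores = c17 - c0
--     adultos = c64 - c17
--     mayores = n - c64 + c0
--     return f"Menores: {menores}. \n Adultos: {adultos}. \n Mayores: {mayores}."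
-- ===== Notes on version B (the rewrite author's own statement) =====
-- stated objective: alternative
-- what changed: Sorts the list once and locates the bucket boundaries with a hand-written binary search (count of elements <= 0, <= 17, <= 64), deriving the three bucket sizes by subtraction instead of classifying each element in a counting loop.
import Mathlib
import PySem

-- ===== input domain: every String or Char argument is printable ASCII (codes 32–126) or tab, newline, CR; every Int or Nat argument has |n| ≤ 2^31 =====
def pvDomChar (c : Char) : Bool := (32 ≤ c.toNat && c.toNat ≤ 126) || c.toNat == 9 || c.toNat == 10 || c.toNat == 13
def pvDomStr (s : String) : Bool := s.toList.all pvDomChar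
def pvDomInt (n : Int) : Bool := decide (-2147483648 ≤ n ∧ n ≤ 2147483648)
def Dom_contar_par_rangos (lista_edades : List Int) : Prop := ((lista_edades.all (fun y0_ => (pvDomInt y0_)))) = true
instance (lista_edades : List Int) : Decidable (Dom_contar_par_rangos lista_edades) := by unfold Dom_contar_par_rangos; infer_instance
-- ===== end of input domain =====

-- B sorts the list once and finds the bucket boundaries by binary search,
-- deriving the three counts by subtraction (objective: alternative algorithm).

-- ===== PORT A =====
-- one pass, three accumulators, branches in A's order
def contar_par_rangos (lista_edades : List Int) : String :=
  let s := lista_edades.foldl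
    (fun (c : Int × Int × Int) edad =>
      if edad > 0 ∧ edad ≤ 17 then (c.1 + 1, c.2.1, c.2.2)
      else if edad ≥ 18 ∧ edad ≤ 64 then (c.1, c.2.1 + 1, c.2.2)
      else (c.1, c.2.1, c.2.2 + 1))
    (0, 0, 0)
  "Menores: " ++ PySem.Int.toStr s.1 ++ ". \n Adultos: " ++ PySem.Int.toStr s.2.1 ++
    ". \n Mayores: " ++ PySem.Int.toStr s.2.2 ++ "."

-- ===== PORT B =====
-- Source B's `cuantos_hasta`: binary search over the sorted list, state (lo, hi);
-- orden[mid] is always in range, transcribed as getD with default 0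
def cuantosHasta (orden : List Int) (x : Int) (lo hi : Nat) : Nat :=
  if _h : lo < hi then
    let mid := (lo + hi) / 2
    if orden.getD mid 0 ≤ x then cuantosHasta orden x (mid + 1) hi
    else cuantosHasta orden x lo mid
  else lo
termination_by hi - lo
decreasing_by all_goals omega

def contar_par_rangos_alt (lista_edades : List Int) : String :=
  let orden := PySem.List.sorted lista_edades (fun x => x) false
  let n := orden.length
  let c0 := cuantosHasta orden 0 0 n
  let c17 := cuantosHasta orden 17 0 n
  let c64 := cuantosHasta orden 64 0 n
  let menores : Int := (c17 : Int) - (c0 : Int)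
  let adultos : Int := (c64 : Int) - (c17 : Int)
  let mayores : Int := (n : Int) - (c64 : Int) + (c0 : Int)
  "Menores: " ++ PySem.Int.toStr menores ++ ". \n Adultos: " ++ PySem.Int.toStr adultos ++
    ". \n Mayores: " ++ PySem.Int.toStr mayores ++ "."

-- ===== PRECONDITION & SPEC =====
def Spec_contar_par_rangos (lista_edades : List Int) (out : String) : Prop := out = contar_par_rangos_alt lista_edades
instance (lista_edades : List Int) (out : String) : Decidable (Spec_contar_par_rangos lista_edades out) := by unfold Spec_contar_par_rangos; infer_instance

-- ===== CLAIM (what is proved, stated in full; the proofs are below) =====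
def Claim_equal_contar_par_rangos : Prop := ∀ (lista_edades : List Int), Dom_contar_par_rangos lista_edades → Spec_contar_par_rangos lista_edades (contar_par_rangos lista_edades)

-- ===== LEMMAS AND PROOFS =====

def cMen (l : List Int) : Nat := l.countP (fun e => decide (0 < e ∧ e ≤ 17))
def cAdu (l : List Int) : Nat := l.countP (fun e => decide (18 ≤ e ∧ e ≤ 64))
def cMay (l : List Int) : Nat :=
  l.countP (fun e => !decide (0 < e ∧ e ≤ 17) && !decide (18 ≤ e ∧ e ≤ 64))
def cLE (l : List Int) (x : Int) : Nat := l.countP (fun e => decide (e ≤ x))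

theorem ite_bool_false : (if false = true then (1:Nat) else 0) = 0 := rfl
theorem ite_bool_true : (if true = true then (1:Nat) else 0) = 1 := rfl

theorem contar_fold_eq (l : List Int) (m a mo : Int) :
    l.foldl
      (fun (c : Int × Int × Int) edad =>
        if edad > 0 ∧ edad ≤ 17 then (c.1 + 1, c.2.1, c.2.2)
        else if edad ≥ 18 ∧ edad ≤ 64 then (c.1, c.2.1 + 1, c.2.2)
        else (c.1, c.2.1, c.2.2 + 1))
      (m, a, mo)
    = (m + (cMen l : Int), a + (cAdu l : Int), mo + (cMay l : Int)) := by
  induction l generalizing m a mo with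
  | nil => simp [cMen, cAdu, cMay]
  | cons x xs ih =>
    simp only [List.foldl_cons]
    by_cases h1 : x > 0 ∧ x ≤ 17
    · have e1 : decide (0 < x ∧ x ≤ 17) = true := by simp; omega
      have e2 : decide (18 ≤ x ∧ x ≤ 64) = false := by simp; omega
      rw [if_pos h1, ih]
      simp only [cMen, cAdu, cMay, List.countP_cons, e1, e2, Bool.not_true, Bool.false_and,
        ite_bool_false]
      refine Prod.ext ?_ (Prod.ext ?_ ?_) <;> push_cast <;> ring
    · rw [if_neg h1]
      by_cases h2 : x ≥ 18 ∧ x ≤ 64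
      · have e1 : decide (0 < x ∧ x ≤ 17) = false := by simp; omega
        have e2 : decide (18 ≤ x ∧ x ≤ 64) = true := by simp; omega
        rw [if_pos h2, ih]
        simp only [cMen, cAdu, cMay, List.countP_cons, e1, e2, Bool.not_true, Bool.not_false,
          Bool.and_false, ite_bool_false]
        refine Prod.ext ?_ (Prod.ext ?_ ?_) <;> push_cast <;> ring
      · have e1 : decide (0 < x ∧ x ≤ 17) = false := by simp; omega
        have e2 : decide (18 ≤ x ∧ x ≤ 64) = false := by simp; omega
        rw [if_neg h2, ih]
        simp only [cMen, cAdu, cMay, List.countP_cons, e1, e2, Bool.not_false, Bool.true_and,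
          ite_bool_false]
        refine Prod.ext ?_ (Prod.ext ?_ ?_) <;> push_cast <;> ring

theorem count_partition (l : List Int) : cMen l + cAdu l + cMay l = l.length := by
  induction l with
  | nil => rfl
  | cons x xs ih =>
    simp only [cMen, cAdu, cMay, List.countP_cons, List.length_cons]
    simp only [cMen, cAdu, cMay] at ih
    rcases Bool.eq_false_or_eq_true (decide (0 < x ∧ x ≤ 17)) with e1 | e1 <;>
    rcases Bool.eq_false_or_eq_true (decide (18 ≤ x ∧ x ≤ 64)) with e2 | e2 <;>
      · simp only [e1, e2, Bool.not_true, Bool.not_false, Bool.true_and, Bool.false_and,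
          Bool.and_false, Bool.and_true, if_true, ite_bool_true, ite_bool_false]
        first
        | omega
        | (exfalso; simp at e1 e2; omega)

-- in a sorted list, position i holds an element ≤ x iff i < number of elements ≤ x
theorem sorted_getD_le_iff (s : List Int) (hp : s.Pairwise (· ≤ ·)) (x : Int) :
    ∀ i, i < s.length → (s.getD i 0 ≤ x ↔ i < cLE s x) := by
  induction s with
  | nil => intro i hi; simp at hi
  | cons a t ih =>
    rcases List.pairwise_cons.mp hp with ⟨ha, ht⟩
    intro i hi
    by_cases hax : a ≤ x
    · have hc : cLE (a :: t) x = cLE t x + 1 := by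
        simp [cLE, hax]
      cases i with
      | zero => simpa [hc] using hax
      | succ j =>
        have hj : j < t.length := by simpa using hi
        have := ih ht j hj
        simpa [hc, Nat.succ_lt_succ_iff] using this
    · have h0 : cLE (a :: t) x = 0 := by
        simp only [cLE, List.countP_cons]
        have ht0 : t.countP (fun e => decide (e ≤ x)) = 0 := by
          apply List.countP_eq_zero.mpr
          intro b hb
          have : a ≤ b := ha b hb
          simp; omega
        simp [ht0, hax]
      rw [h0]
      cases i with
      | zero => simpa using hax
      | succ j =>
        have hj : j < t.length := by simpa using hi
        have hb : t.getD j 0 ∈ t := by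
          have : t.getD j 0 = t[j] := List.getD_eq_getElem t 0 hj
          rw [this]; exact List.getElem_mem hj
        have : a ≤ t.getD j 0 := ha _ hb
        simp only [List.getD_cons_succ]
        constructor
        · intro h; omega
        · intro h; omega

theorem cuantosHasta_eq (s : List Int) (hp : s.Pairwise (· ≤ ·)) (x : Int) :
    ∀ k lo hi, hi - lo ≤ k → lo ≤ cLE s x → cLE s x ≤ hi → hi ≤ s.length →
      cuantosHasta s x lo hi = cLE s x := by
  intro k
  induction k with
  | zero =>
    intro lo hi hk h1 h2 h3
    have : ¬ lo < hi := by omega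
    rw [cuantosHasta, dif_neg this]; omega
  | succ k ih =>
    intro lo hi hk h1 h2 h3
    by_cases hlt : lo < hi
    · rw [cuantosHasta, dif_pos hlt]
      set mid := (lo + hi) / 2 with hmid
      have hml : lo ≤ mid := by omega
      have hmh : mid < hi := by omega
      have hmn : mid < s.length := by omega
      have hiff := sorted_getD_le_iff s hp x mid hmn
      by_cases hc : s.getD mid 0 ≤ x
      · have : mid < cLE s x := hiff.mp hc
        simp only [hc, if_pos]
        exact ih (mid + 1) hi (by omega) (by omega) h2 h3
      · have : ¬ mid < cLE s x := fun h => hc (hiff.mpr h)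
        simp only [hc, if_false]
        exact ih lo mid (by omega) h1 (by omega) (by omega)
    · rw [cuantosHasta, dif_neg hlt]; omega

theorem cuantosHasta_sorted (l : List Int) (x : Int) :
    cuantosHasta (PySem.List.sorted l (fun x => x) false) x 0 l.length = cLE l x := by
  set s := PySem.List.sorted l (fun x => x) false with hs
  have hp : s.Pairwise (· ≤ ·) := by
    simpa using PySem.List.sorted_pairwise (xs := l) (key := fun x => x)
  have hperm : s.Perm l := PySem.List.sorted_perm l (fun x => x) false
  have hc : cLE s x = cLE l x := hperm.countP_eq _
  have hlen : cLE s x ≤ s.length := List.countP_le_length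
  have hls : l.length = s.length := by rw [hs, PySem.List.length_sorted]
  rw [← hc, hls]
  exact cuantosHasta_eq s hp x s.length 0 s.length (by omega) (by omega) hlen (le_refl _)

-- splitting counts at the boundaries (over the original list)
theorem cLE_split17 (l : List Int) : cLE l 17 = cLE l 0 + cMen l := by
  induction l with
  | nil => rfl
  | cons a t ih =>
    simp only [cLE, cMen, List.countP_cons] at *
    rcases Bool.eq_false_or_eq_true (decide (a ≤ 17)) with e1 | e1 <;>
    rcases Bool.eq_false_or_eq_true (decide (a ≤ 0)) with e2 | e2 <;>
    rcases Bool.eq_false_or_eq_true (decide (0 < a ∧ a ≤ 17)) with e3 | e3 <;>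
      first
      | (simp only [e1, e2, e3, ite_bool_false]; omega)
      | (exfalso; simp at e1 e2 e3; omega)

theorem cLE_split64 (l : List Int) : cLE l 64 = cLE l 17 + cAdu l := by
  induction l with
  | nil => rfl
  | cons a t ih =>
    simp only [cLE, cAdu, List.countP_cons] at *
    rcases Bool.eq_false_or_eq_true (decide (a ≤ 64)) with e1 | e1 <;>
    rcases Bool.eq_false_or_eq_true (decide (a ≤ 17)) with e2 | e2 <;>
    rcases Bool.eq_false_or_eq_true (decide (18 ≤ a ∧ a ≤ 64)) with e3 | e3 <;>
      first
      | (simp only [e1, e2, e3, ite_bool_false]; omega)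
      | (exfalso; simp at e1 e2 e3; omega)

theorem contar_eq (l : List Int) : contar_par_rangos l = contar_par_rangos_alt l := by
  unfold contar_par_rangos contar_par_rangos_alt
  rw [contar_fold_eq]
  simp only [PySem.List.length_sorted, cuantosHasta_sorted]
  have h17 := cLE_split17 l
  have h64 := cLE_split64 l
  have hpart := count_partition l
  have e1 : (cLE l 17 : Int) - (cLE l 0 : Int) = (cMen l : Int) := by omega
  have e2 : (cLE l 64 : Int) - (cLE l 17 : Int) = (cAdu l : Int) := by omega
  have e3 : (l.length : Int) - (cLE l 64 : Int) + (cLE l 0 : Int) = (cMay l : Int) := by omega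
  rw [e1, e2, e3]
  simp

-- ===== VERDICT (by name: the statement is the Claim_ definition above) =====
theorem contar_par_rangos_spec : Claim_equal_contar_par_rangos := by
  intro l _
  exact contar_eq l
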